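-- pv_equiv track=rewrite | github.com/thudsonbu/dip | permutations/generate_all_subsets.py | insertRight
-- ===== SOURCE A (Python) =====
-- def insertRight( nums, base ):
--     result = []
--     idx = 0
--     nextResult = []
--
--     while idx < len(nums):
--         new = base + [nums[idx]]
--         result.append(new)
--
--         if idx == 0:
--             nextResult = insertRight( nums[1:], new )
--
--         idx += 1
--
--     return result + nextResult
-- ===== SOURCE B (Python) =====
-- def insertRight(nums, base):
--     n = len(nums)
--     out = []
--     for d in range(n):
--         for j in range(d, n):
--             out.append(base + nums[:d] + [nums[j]])
--     return out
-- ===== Notes on version B (the rewrite author's own statement) =====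
-- stated objective: simpler
-- what changed: Replaced A's recursion with a while loop and mutable result/nextResult state by two plain nested index loops that directly emit base + nums[:d] + [nums[j]] in the same order.
import Mathlib
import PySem

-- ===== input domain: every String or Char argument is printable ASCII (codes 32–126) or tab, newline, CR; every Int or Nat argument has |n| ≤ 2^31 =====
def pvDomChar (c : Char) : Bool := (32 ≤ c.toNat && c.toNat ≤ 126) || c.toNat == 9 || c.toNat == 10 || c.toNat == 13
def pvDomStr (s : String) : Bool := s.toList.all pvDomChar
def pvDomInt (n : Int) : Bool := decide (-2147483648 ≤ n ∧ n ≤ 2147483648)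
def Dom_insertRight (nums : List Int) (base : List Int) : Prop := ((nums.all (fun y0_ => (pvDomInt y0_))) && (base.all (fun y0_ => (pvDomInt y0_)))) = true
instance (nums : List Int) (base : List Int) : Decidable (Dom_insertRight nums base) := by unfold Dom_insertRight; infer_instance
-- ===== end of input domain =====

-- B replaces A's recursion-plus-while with two nested index loops emitting base ++ nums[:d] ++ [nums[j]] (objective: simpler, same cost).

-- ===== PORT A =====
-- A's while loop appends base+[nums[idx]] for each idx (ported as the map over nums),
-- and at idx == 0 records the recursive call on nums[1:] with the first new list.
def insertRight : List Int → List Int → List (List Int)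
  | [], _ => []
  | x :: rest, base =>
      (((x :: rest).map (fun v => base ++ [v]))) ++ insertRight rest (base ++ [x])

-- ===== PORT B =====
-- Source B's nested for-loops over range(n) and range(d, n); nums[:d] = take d, nums[j] = getD j
-- (both indices are nonnegative and j < n in Source B, so take/getD are exact here).
def insertRight_alt (nums : List Int) (base : List Int) : List (List Int) :=
  (List.range nums.length).flatMap (fun d =>
    (List.range' d (nums.length - d)).map (fun j =>
      base ++ nums.take d ++ [nums.getD j 0]))

-- ===== PRECONDITION & SPEC =====
def Spec_insertRight (nums : List Int) (base : List Int) (out : List (List Int)) : Prop := out = insertRight_alt nums base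
instance (nums : List Int) (base : List Int) (out : List (List Int)) : Decidable (Spec_insertRight nums base out) := by unfold Spec_insertRight; infer_instance

-- ===== CLAIM (what is proved, stated in full; the proofs are below) =====
def Claim_equal_insertRight : Prop := ∀ (nums : List Int) (base : List Int), Dom_insertRight nums base → Spec_insertRight nums base (insertRight nums base)

-- ===== LEMMAS AND PROOFS =====

-- the d = 0 slab of B is exactly A's while-loop output
theorem range_map_getD (l : List Int) (F : Int → List Int) :
    (List.range l.length).map (fun j => F (l.getD j 0)) = l.map F := by
  induction l with
  | nil => simp
  | cons x rest ih =>
      simp only [List.length_cons, List.range_succ_eq_map, List.map_cons, List.map_map]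
      simpa [Function.comp] using ih

theorem alt_eq (nums : List Int) : ∀ base, insertRight_alt nums base = insertRight nums base := by
  induction nums with
  | nil => intro base; simp [insertRight_alt, insertRight]
  | cons x rest ih =>
      intro base
      have hlen : (x :: rest).length = rest.length + 1 := rfl
      simp only [insertRight_alt, insertRight, hlen, List.range_succ_eq_map,
        List.flatMap_cons, List.flatMap_map]
      rw [← ih (base ++ [x])]
      congr 1
      · simpa [List.range_eq_range'] using
          range_map_getD (x :: rest) (fun v => base ++ [v])
      · unfold insertRight_alt
        apply List.flatMap_congr
        intro d _
        have h1 : rest.length + 1 - (d + 1) = rest.length - d := by omega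
        have h2 : List.range' (d + 1) (rest.length - d) =
            (List.range' d (rest.length - d)).map (fun j => j + 1) := by
          rw [List.range'_eq_map_range, List.range'_eq_map_range, List.map_map]
          apply List.map_congr_left; intro i _; simp [Function.comp]; omega
        simp only [Nat.succ_eq_add_one, h1, h2, List.map_map]
        apply List.map_congr_left
        intro j _
        simp [Function.comp, List.getD]

-- ===== VERDICT (by name: the statement is the Claim_ definition above) =====
theorem insertRight_spec : Claim_equal_insertRight := by
  intro nums base _
  unfold Spec_insertRight
  exact (alt_eq nums base).symm
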